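-- pv_equiv track=rewrite | github.com/arj1211/aoc | 2024/day5/main.py | swap_elements
-- ===== SOURCE A (Python) =====
-- def swap_elements(l, elemA, elemB):
--     i, j = 0, 0
--     for idx, value in enumerate(l):
--         if value == elemA:
--             i = idx
--         if value == elemB:
--             j = idx
--     l[i], l[j] = l[j], l[i]
--     return l
-- ===== SOURCE B (Python) =====
-- def _last_index(l, elem):
--     for idx in reversed(range(len(l))):
--         if l[idx] == elem:
--             return idx
--     return 0
--
-- def swap_elements(l, elemA, elemB):
--     i = _last_index(l, elemA)
--     j = _last_index(l, elemB)
--     l[i], l[j] = l[j], l[i]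
--     return l
-- ===== Notes on version B (the rewrite author's own statement) =====
-- stated objective: alternative
-- what changed: Replaces the single forward pass that tracks both last indices with two independent reverse scans that each stop at the first (i.e. last) match, defaulting to 0 when absent, then the same swap.
import Mathlib
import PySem

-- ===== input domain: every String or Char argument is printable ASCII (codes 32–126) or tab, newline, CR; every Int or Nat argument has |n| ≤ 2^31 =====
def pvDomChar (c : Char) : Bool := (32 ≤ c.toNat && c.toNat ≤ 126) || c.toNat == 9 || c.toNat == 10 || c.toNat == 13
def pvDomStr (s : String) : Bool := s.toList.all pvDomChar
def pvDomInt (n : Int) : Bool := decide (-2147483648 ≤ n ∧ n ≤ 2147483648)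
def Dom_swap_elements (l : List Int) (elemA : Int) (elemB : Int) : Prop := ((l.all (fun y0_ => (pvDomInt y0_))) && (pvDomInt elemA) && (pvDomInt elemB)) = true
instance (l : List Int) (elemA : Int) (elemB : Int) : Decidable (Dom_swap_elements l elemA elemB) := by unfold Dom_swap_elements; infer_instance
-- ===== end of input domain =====

-- B replaces A's single forward pass (tracking both last indices) by two independent
-- reverse scans, each stopping at the first (= last) match; same swap, same in-place
-- mutation in Python; equivalence of the RETURN value is proved for nonempty lists.

-- ===== PORT A =====
-- one forward pass over enumerate(l) accumulating (i, j), then the simultaneous swap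
def swap_elements (l : List Int) (elemA : Int) (elemB : Int) : List Int :=
  let p : Int × Int := (PySem.List.enumerate l 0).foldl
    (fun (p : Int × Int) iv =>
      let p1 := if iv.2 = elemA then (iv.1, p.2) else p
      if iv.2 = elemB then (p1.1, iv.1) else p1) (0, 0)
  -- l[i], l[j] = l[j], l[i] : RHS read first, then two assignments (in range by Pre_)
  let vi := PySem.List.pyGetD l p.1 0
  let vj := PySem.List.pyGetD l p.2 0
  PySem.List.pySetD (PySem.List.pySetD l p.1 vj) p.2 vi

-- ===== PORT B =====
-- reverse scan: 'for idx in reversed(range(len(l))): if l[idx] == elem: return idx' / 'return 0'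
def findLastGo : List Int → Int → Nat → Nat
  | [], _, _ => 0
  | x :: xs, e, idx => if x = e then idx else findLastGo xs e (idx - 1)

def findLast (l : List Int) (e : Int) : Nat := findLastGo l.reverse e (l.length - 1)

def swap_elements_alt (l : List Int) (elemA : Int) (elemB : Int) : List Int :=
  let i := findLast l elemA
  let j := findLast l elemB
  let vi := PySem.List.pyGetD l (i : Int) 0
  let vj := PySem.List.pyGetD l (j : Int) 0
  PySem.List.pySetD (PySem.List.pySetD l (i : Int) vj) (j : Int) vi

-- ===== PRECONDITION & SPEC =====
-- A raises IndexError on the empty list (l[0] on both sides of the swap); B raises there too.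
def Pre_swap_elements (l : List Int) (elemA : Int) (elemB : Int) : Prop := l ≠ []
instance (l : List Int) (elemA : Int) (elemB : Int) : Decidable (Pre_swap_elements l elemA elemB) := by unfold Pre_swap_elements; infer_instance
def pvWitness_swap_elements : List Int × Int × Int := ([1, 2, 1, 3], 1, 3)

def Spec_swap_elements (l : List Int) (elemA : Int) (elemB : Int) (out : List Int) : Prop := out = swap_elements_alt l elemA elemB
instance (l : List Int) (elemA : Int) (elemB : Int) (out : List Int) : Decidable (Spec_swap_elements l elemA elemB out) := by unfold Spec_swap_elements; infer_instance

-- ===== CLAIM (what is proved, stated in full; the proofs are below) =====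
def Claim_equal_swap_elements : Prop := ∀ (l : List Int) (elemA : Int) (elemB : Int), Dom_swap_elements l elemA elemB → Pre_swap_elements l elemA elemB → Spec_swap_elements l elemA elemB (swap_elements l elemA elemB)

-- ===== LEMMAS AND PROOFS =====

-- the last-index fold for a single element
def lastIdxFold (l : List Int) (e : Int) : Int :=
  (PySem.List.enumerate l 0).foldl (fun acc iv => if iv.2 = e then iv.1 else acc) 0

-- A's paired fold splits into two independent single-element folds
theorem fold_pair_split (a b : Int) (L : List (Int × Int)) (p0 : Int × Int) :
    L.foldl (fun (p : Int × Int) iv =>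
      let p1 := if iv.2 = a then (iv.1, p.2) else p
      if iv.2 = b then (p1.1, iv.1) else p1) p0
    = (L.foldl (fun acc iv => if iv.2 = a then iv.1 else acc) p0.1,
       L.foldl (fun acc iv => if iv.2 = b then iv.1 else acc) p0.2) := by
  induction L generalizing p0 with
  | nil => simp
  | cons hd tl ih =>
    simp only [List.foldl_cons]
    rw [ih]
    simp [apply_ite Prod.fst, apply_ite Prod.snd]

-- the single-element fold computes B's reverse-scan index
theorem lastIdxFold_eq_findLast (l : List Int) (e : Int) :
    lastIdxFold l e = ((findLast l e : Nat) : Int) := by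
  induction l using List.reverseRecOn with
  | nil => simp [lastIdxFold, findLast, findLastGo, PySem.List.enumerate]
  | append_singleton l x ih =>
    have henum : PySem.List.enumerate (l ++ [x]) 0
        = PySem.List.enumerate l 0 ++ [((l.length : Int), x)] := by
      rw [PySem.List.enumerate_append]
      simp [PySem.List.enumerate]
    have hfl : findLast (l ++ [x]) e
        = if x = e then l.length else findLast l e := by
      unfold findLast
      simp only [List.reverse_append, List.reverse_singleton, List.singleton_append,
        List.length_append, List.length_singleton]
      have : l.length + 1 - 1 = l.length := by omega
      rw [this, findLastGo]
    unfold lastIdxFold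
    rw [henum, List.foldl_append]
    simp only [List.foldl_cons, List.foldl_nil]
    rw [hfl]
    by_cases hx : x = e
    · simp [hx]
    · simpa [hx] using ih

-- ===== VERDICT (by name: the statement is the Claim_ definition above) =====
theorem swap_elements_spec : Claim_equal_swap_elements := by
  intro l elemA elemB _ _
  unfold Spec_swap_elements swap_elements swap_elements_alt
  rw [fold_pair_split]
  rw [show (0, 0).1 = (0 : Int) from rfl, show (0, 0).2 = (0 : Int) from rfl]
  rw [← lastIdxFold, ← lastIdxFold, lastIdxFold_eq_findLast, lastIdxFold_eq_findLast]
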